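-- pv_equiv track=rewrite | github.com/Alvinmff/metar-auto-dashboard-v2 | api/index.py | extract_temp
-- ===== SOURCE A (Python) =====
-- def extract_temp(metar):
--     """Extract temperature from METAR string"""
--     if not metar or not isinstance(metar, str):
--         return 0
--     try:
--         parts = metar.split()
--         for part in parts:
--             if '/' in part and part != 'NIL':
--                 try:
--                     temp = part.split('/')[0]
--                     return int(temp) if temp.lstrip('-').isdigit() else 0
--                 except:
--                     return 0
--     except:
--         return 0
--     return 0
-- ===== SOURCE B (Python) =====
-- def extract_temp(metar):
--     """Extract temperature from METAR string"""
--     if not metar or not isinstance(metar, str):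
--         return 0
--     # single forward scan: find the first '/', take the non-space run just before it
--     cur = []
--     temp = None
--     for c in metar:
--         if c == '/':
--             temp = ''.join(cur)
--             break
--         if c.isspace():
--             cur = []
--         else:
--             cur.append(c)
--     if temp is None:
--         return 0
--     try:
--         return int(temp) if temp.lstrip('-').isdigit() else 0
--     except ValueError:
--         return 0
-- ===== Notes on version B (the rewrite author's own statement) =====
-- stated objective: alternative
-- what changed: Replaces split() into a token list plus a per-token '/'-membership test and a nested split('/') by a single forward character scan that tracks the current non-space run and stops at the first '/'.
import Mathlib
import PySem

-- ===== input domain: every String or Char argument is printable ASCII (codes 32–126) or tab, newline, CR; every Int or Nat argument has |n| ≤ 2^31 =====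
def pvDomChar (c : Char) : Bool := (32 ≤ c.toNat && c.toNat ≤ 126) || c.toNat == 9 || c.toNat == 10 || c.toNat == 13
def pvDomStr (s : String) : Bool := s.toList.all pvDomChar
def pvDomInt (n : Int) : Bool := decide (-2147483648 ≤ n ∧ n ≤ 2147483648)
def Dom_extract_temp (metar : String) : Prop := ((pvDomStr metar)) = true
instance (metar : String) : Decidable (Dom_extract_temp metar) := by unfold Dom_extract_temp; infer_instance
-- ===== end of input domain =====

-- B replaces A's split()-into-tokens plus nested split('/') by one forward character scan (objective: alternative).

-- ===== PORT A =====
-- the for-loop over parts; each part: '/' in part and part != 'NIL', temp = part.split('/')[0]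
-- (split never returns an empty list, so [0] is headD), lstrip('-') = dropWhile '-',
-- int(temp) with ValueError caught → 0 is (ofChars? temp).getD 0
def extractTempLoopA : List (List Char) → Int
  | [] => 0
  | part :: rest =>
    if PySem.Chars.isIn ['/'] part && part != ['N', 'I', 'L'] then
      let temp := (PySem.Chars.splitOn part ['/']).headD []
      if PySem.Chars.strIsdigit (temp.dropWhile (fun c => c == '-')) then
        (PySem.Int.ofChars? temp).getD 0
      else 0
    else extractTempLoopA rest

def extract_temp (metar : String) : Int :=
  if metar.toList.isEmpty then 0      -- 'not metar' (isinstance guard is always true for a String)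
  else extractTempLoopA (PySem.Chars.split₀ metar.toList)

-- ===== PORT B =====
-- the for-loop over characters: cur = current non-space run; first '/' returns it
def extractTempScanB (cur : List Char) : List Char → Option (List Char)
  | [] => none
  | c :: rest =>
    if c == '/' then some cur
    else if PySem.Chars.isspace c then extractTempScanB [] rest
    else extractTempScanB (cur ++ [c]) rest

def extract_temp_alt (metar : String) : Int :=
  if metar.toList.isEmpty then 0      -- 'not metar'
  else
    match extractTempScanB [] metar.toList with
    | none => 0
    | some temp =>
      if PySem.Chars.strIsdigit (temp.dropWhile (fun c => c == '-')) then
        (PySem.Int.ofChars? temp).getD 0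
      else 0

-- ===== PRECONDITION & SPEC =====
def Spec_extract_temp (metar : String) (out : Int) : Prop := out = extract_temp_alt metar
instance (metar : String) (out : Int) : Decidable (Spec_extract_temp metar out) := by unfold Spec_extract_temp; infer_instance

-- ===== CLAIM (what is proved, stated in full; the proofs are below) =====
def Claim_equal_extract_temp : Prop := ∀ (metar : String), Dom_extract_temp metar → Spec_extract_temp metar (extract_temp metar)

-- ===== LEMMAS AND PROOFS =====

-- the shared tail computation on the extracted prefix
def pvGuardInt (t : List Char) : Int :=
  if PySem.Chars.strIsdigit (t.dropWhile (fun c => c == '-')) then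
    (PySem.Int.ofChars? t).getD 0
  else 0

theorem split0_go_append (cs : List Char) (cur : List Char) (acc : List (List Char)) :
    PySem.Chars.split₀.go cs cur acc = acc.reverse ++ PySem.Chars.split₀.go cs cur [] := by
  induction cs generalizing cur acc with
  | nil => simp [PySem.Chars.split₀.go]; split <;> simp
  | cons c rest ih =>
    simp only [PySem.Chars.split₀.go]
    split
    · split
      · exact ih [] acc
      · rw [ih [] (cur.reverse :: acc), ih [] [cur.reverse]]; simp
    · exact ih (c :: cur) acc

theorem splitOn_go_append (sep : List Char) (fuel : Nat) (l cur : List Char) (acc : List (List Char)) :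
    PySem.Chars.splitOn.go sep fuel l cur acc = acc.reverse ++ PySem.Chars.splitOn.go sep fuel l cur [] := by
  induction fuel generalizing l cur acc with
  | zero => simp [PySem.Chars.splitOn.go]
  | succ fuel ih =>
    cases l with
    | nil => simp [PySem.Chars.splitOn.go]
    | cons c rest =>
      simp only [PySem.Chars.splitOn.go]
      split
      · rw [ih _ [] (cur.reverse :: acc), ih _ [] [cur.reverse]]; simp
      · exact ih rest (c :: cur) acc

theorem splitOn_go_head (fuel : Nat) (l cur : List Char) (h : l.length < fuel) :
    (PySem.Chars.splitOn.go ['/'] fuel l cur []).headD [] = cur.reverse ++ l.takeWhile (fun c => c ≠ '/') := by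
  induction fuel generalizing l cur with
  | zero => omega
  | succ fuel ih =>
    cases l with
    | nil => simp [PySem.Chars.splitOn.go]
    | cons c rest =>
      simp only [PySem.Chars.splitOn.go]
      by_cases hc : c = '/'
      · subst hc
        rw [if_pos (by simp [List.isPrefixOf])]
        rw [splitOn_go_append]
        simp only [List.reverse_cons, List.reverse_nil, List.nil_append, List.singleton_append,
          List.headD_cons, List.takeWhile_cons]
        norm_num
      · rw [if_neg (by rw [List.isPrefixOf_cons₂]; simp only [Bool.and_eq_true, beq_iff_eq]; exact fun h => hc h.1.symm)]
        rw [ih rest (c :: cur) (by simpa using Nat.lt_of_succ_lt_succ h)]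
        simp [hc]

theorem takeWhile_no_slash (p q : List Char) (hp : '/' ∉ p) :
    (p ++ '/' :: q).takeWhile (fun c => decide (c ≠ '/')) = p := by
  induction p with
  | nil => simp
  | cons a p ih =>
    simp only [List.mem_cons, not_or] at hp
    have ha : a ≠ '/' := fun h => hp.1 h.symm
    simp only [List.cons_append, List.takeWhile_cons, decide_eq_true_eq]
    rw [if_pos ha, ih hp.2]

theorem isIn_slash_of_mem {t : List Char} (h : '/' ∈ t) : PySem.Chars.isIn ['/'] t = true := by
  rw [PySem.Chars.isIn_iff_infix]
  obtain ⟨l, r, rfl⟩ := List.mem_iff_append.mp h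
  exact ⟨l, r, by simp⟩

theorem isIn_slash_eq_false {t : List Char} (h : '/' ∉ t) : PySem.Chars.isIn ['/'] t = false := by
  rw [PySem.Chars.isIn_eq_false_iff]
  rintro ⟨l, r, rfl⟩
  exact h (by simp)

theorem loopA_cons (t : List Char) (ts : List (List Char)) :
    extractTempLoopA (t :: ts) =
      if PySem.Chars.isIn ['/'] t && t != ['N', 'I', 'L'] then
        pvGuardInt ((PySem.Chars.splitOn t ['/']).headD [])
      else extractTempLoopA ts := rfl

theorem loopA_skip {t : List Char} (h : '/' ∉ t) (ts : List (List Char)) :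
    extractTempLoopA (t :: ts) = extractTempLoopA ts := by
  rw [loopA_cons, if_neg (by simp [isIn_slash_eq_false h])]

theorem loopA_hit (cur pre : List Char) (hpre : '/' ∉ pre) (ts : List (List Char)) :
    extractTempLoopA ((cur ++ '/' :: pre).reverse :: ts) = pvGuardInt pre.reverse := by
  have hrev : (cur ++ '/' :: pre).reverse = pre.reverse ++ '/' :: cur.reverse := by simp
  have hmem : '/' ∈ pre.reverse ++ '/' :: cur.reverse := by simp
  rw [hrev, loopA_cons, if_pos (by
    simp only [Bool.and_eq_true, bne_iff_ne, ne_eq]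
    exact ⟨isIn_slash_of_mem hmem, fun he => by rw [he] at hmem; simp at hmem⟩)]
  have hhead : (PySem.Chars.splitOn (pre.reverse ++ '/' :: cur.reverse) ['/']).headD [] = pre.reverse := by
    unfold PySem.Chars.splitOn
    rw [splitOn_go_head _ _ [] (Nat.lt_succ_self _)]
    rw [List.reverse_nil, List.nil_append, takeWhile_no_slash _ _ (by simpa using hpre)]
  rw [hhead]

-- once the current run already contains a '/', A's answer is determined: prefix before the first '/'
theorem loopA_found (cs : List Char) (cur pre : List Char) (hpre : '/' ∉ pre) :
    extractTempLoopA (PySem.Chars.split₀.go cs (cur ++ '/' :: pre) []) = pvGuardInt pre.reverse := by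
  induction cs generalizing cur with
  | nil =>
    simp only [PySem.Chars.split₀.go]
    rw [if_neg (by simp)]
    simpa using loopA_hit cur pre hpre []
  | cons c rest ih =>
    simp only [PySem.Chars.split₀.go]
    by_cases hs : PySem.Chars.isspace c = true
    · rw [if_pos hs, if_neg (by simp)]
      rw [split0_go_append]
      simpa using loopA_hit cur pre hpre _
    · rw [if_neg hs]
      exact ih (c :: cur)

-- the main invariant: cur is the current non-space, slash-free run (A stores it reversed, B in order)
theorem main_inv (cs : List Char) (cur : List Char) (hcur : '/' ∉ cur) :
    extractTempLoopA (PySem.Chars.split₀.go cs cur []) =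
      (match extractTempScanB cur.reverse cs with
       | none => 0
       | some temp => pvGuardInt temp) := by
  induction cs generalizing cur with
  | nil =>
    simp only [PySem.Chars.split₀.go, extractTempScanB]
    split
    · rfl
    · rw [List.reverse_cons, List.reverse_nil, List.nil_append]
      exact loopA_skip (by simpa using hcur) []
  | cons c rest ih =>
    simp only [PySem.Chars.split₀.go, extractTempScanB]
    by_cases hc : (c == '/') = true
    · rw [if_pos hc]
      have : c = '/' := by simpa using hc
      subst this
      rw [if_neg (by simp [PySem.Chars.isspace])]
      exact loopA_found rest [] cur hcur
    · rw [if_neg hc]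
      by_cases hs : PySem.Chars.isspace c = true
      · rw [if_pos hs, if_pos hs]
        split
        · exact ih [] (by simp)
        · rw [split0_go_append]
          simp only [List.reverse_cons, List.reverse_nil, List.nil_append, List.singleton_append]
          rw [loopA_skip (by simpa using hcur)]
          exact ih [] (by simp)
      · rw [if_neg hs, if_neg hs]
        have := ih (c :: cur) (by simp [hcur]; intro h; subst h; simp at hc)
        simpa using this

-- ===== VERDICT (by name: the statement is the Claim_ definition above) =====
theorem extract_temp_spec : Claim_equal_extract_temp := by
  intro metar _
  unfold Spec_extract_temp extract_temp extract_temp_alt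
  split
  · rfl
  · have := main_inv metar.toList [] (by simp)
    unfold PySem.Chars.split₀
    rw [this]
    rfl
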